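-- pv_equiv track=rewrite | github.com/MatiasBS027/TEC | I SEMESTRE/Taller de Programacion/Labs/LabListas/funcionesListas.py | mostrarNoTipicos
-- ===== SOURCE A (Python) =====
-- def nombreProvincia(numero):
--     """
--     Funcionamiento: Obtiene el nombre de la provincia según su código numérico
--     Entradas:
--     - numero (str): Código de provincia (1-9)
--     Salidas:
--     - str: Nombre de la provincia o "Desconocida" si el código es inválido
--     """
--     provincias = ("San José", "Alajuela", "Cartago", "Heredia",
--             "Guanacaste", "Puntarenas", "Limón",
--             "Nacional o naturalizado", "Partida especial de nacimientos")
--     try: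
--         return provincias[int(numero) - 1]
--     except (ValueError, IndexError):
--         return "Desconocida"
--
-- def mostrarNoTipicos(lista):
--     """
--     Funcionamiento: Muestra los donantes de casos especiales (códigos 8 y 9)
--     Entradas:
--     - lista (list): Lista de cédulas de donantes
--     Salidas:
--     - str: Lista de donantes no típicos o mensaje si no hay donantes
--     """
--     resultado = ""
--     for codigo in ["8", "9"]:
--         encontrados = [c for c in lista if c.startswith(codigo)]
--         if encontrados:
--             if len(encontrados) == 1:
--                 resultado += f"\nEl donador {nombreProvincia(codigo)}, es {len(encontrados)} con la cédula:"
--             else: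
--                 resultado += f"\nLos donadores {nombreProvincia(codigo)}, son {len(encontrados)} con las cédulas:"
--             for c in encontrados:
--                 resultado += f"\n - {c}"
--         else:
--             resultado+= f"\nLos donadores de la provincia de {nombreProvincia(codigo)}, son {len(encontrados)} con las cédulas:\nAún no reporta donadores"
--     return resultado
-- ===== SOURCE B (Python) =====
-- def nombreProvincia(numero):
--     provincias = ("San José", "Alajuela", "Cartago", "Heredia",
--             "Guanacaste", "Puntarenas", "Limón",
--             "Nacional o naturalizado", "Partida especial de nacimientos")
--     try:
--         return provincias[int(numero) - 1]
--     except (ValueError, IndexError):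
--         return "Desconocida"
--
--
-- def _seccion(codigo, encontrados):
--     """Formats one province section from its already-collected bucket."""
--     if not encontrados:
--         return (f"\nLos donadores de la provincia de {nombreProvincia(codigo)}, son "
--                 f"{len(encontrados)} con las cédulas:\nAún no reporta donadores")
--     if len(encontrados) == 1:
--         encabezado = f"\nEl donador {nombreProvincia(codigo)}, es {len(encontrados)} con la cédula:"
--     else:
--         encabezado = f"\nLos donadores {nombreProvincia(codigo)}, son {len(encontrados)} con las cédulas:"
--     return encabezado + "".join(f"\n - {c}" for c in encontrados)
--
--
-- def mostrarNoTipicos(lista):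
--     grupo8, grupo9 = [], []
--     for c in lista:
--         if c.startswith("8"):
--             grupo8.append(c)
--         elif c.startswith("9"):
--             grupo9.append(c)
--     return _seccion("8", grupo8) + _seccion("9", grupo9)
-- ===== Notes on version B (the rewrite author's own statement) =====
-- stated objective: alternative
-- what changed: B replaces A's two filtering scans of the whole list (one per province code) by a single grouping pass that buckets each cedula into the 8- and 9-buckets, then formats each bucket with a helper that joins the per-cedula lines instead of accumulating them in a string fold.
import Mathlib
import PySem

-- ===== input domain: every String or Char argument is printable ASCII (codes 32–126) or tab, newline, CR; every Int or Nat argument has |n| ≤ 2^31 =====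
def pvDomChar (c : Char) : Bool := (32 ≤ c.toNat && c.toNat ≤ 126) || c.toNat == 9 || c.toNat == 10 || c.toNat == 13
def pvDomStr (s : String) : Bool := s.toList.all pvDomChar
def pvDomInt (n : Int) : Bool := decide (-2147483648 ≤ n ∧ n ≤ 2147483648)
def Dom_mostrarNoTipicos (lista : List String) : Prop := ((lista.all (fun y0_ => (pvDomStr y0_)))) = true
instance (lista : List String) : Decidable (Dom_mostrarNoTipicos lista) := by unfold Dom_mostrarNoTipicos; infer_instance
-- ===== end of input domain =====

-- B groups the cedulas into the two buckets in a single pass and formats each bucket with a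
-- helper that joins the per-cedula lines, instead of A's two whole-list filtering scans
-- with an in-place string accumulation (objective: alternative decomposition, same cost class).

-- ===== PORT A =====
-- same-module helper used by both Pythons (copied verbatim into Source B)
def nombreProvincia (numero : String) : String :=
  let provincias : List String := ["San José", "Alajuela", "Cartago", "Heredia",
      "Guanacaste", "Puntarenas", "Limón",
      "Nacional o naturalizado", "Partida especial de nacimientos"]
  match PySem.Int.ofStr? numero with
  | none => "Desconocida"                    -- ValueError
  | some n =>
    match PySem.List.pyGet? provincias (n - 1) with
    | some p => p
    | none => "Desconocida"                  -- IndexError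

def mostrarNoTipicos (lista : List String) : String :=
  ["8", "9"].foldl (fun resultado codigo =>
    let encontrados := lista.filter (fun c => PySem.Str.startswith c codigo)
    if encontrados ≠ [] then
      let r1 := if encontrados.length = 1 then
          resultado ++ ("\nEl donador " ++ nombreProvincia codigo ++ ", es "
            ++ PySem.Int.toStr (encontrados.length : Int) ++ " con la cédula:")
        else
          resultado ++ ("\nLos donadores " ++ nombreProvincia codigo ++ ", son "
            ++ PySem.Int.toStr (encontrados.length : Int) ++ " con las cédulas:")
      encontrados.foldl (fun r c => r ++ ("\n - " ++ c)) r1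
    else
      resultado ++ ("\nLos donadores de la provincia de " ++ nombreProvincia codigo ++ ", son "
        ++ PySem.Int.toStr (encontrados.length : Int)
        ++ " con las cédulas:\nAún no reporta donadores")) ""

-- ===== PORT B =====
-- Source B's _seccion: format one province section from its already-collected bucket
def pvSeccion (codigo : String) (encontrados : List String) : String :=
  if encontrados = [] then
    "\nLos donadores de la provincia de " ++ nombreProvincia codigo ++ ", son "
      ++ PySem.Int.toStr (encontrados.length : Int)
      ++ " con las cédulas:\nAún no reporta donadores"
  else
    (if encontrados.length = 1 then
      "\nEl donador " ++ nombreProvincia codigo ++ ", es "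
        ++ PySem.Int.toStr (encontrados.length : Int) ++ " con la cédula:"
     else
      "\nLos donadores " ++ nombreProvincia codigo ++ ", son "
        ++ PySem.Int.toStr (encontrados.length : Int) ++ " con las cédulas:")
    ++ PySem.Str.join "" (encontrados.map (fun c => "\n - " ++ c))

def mostrarNoTipicos_alt (lista : List String) : String :=
  let g := lista.foldl (fun (g : List String × List String) c =>
    if PySem.Str.startswith c "8" then (g.1 ++ [c], g.2)
    else if PySem.Str.startswith c "9" then (g.1, g.2 ++ [c])
    else g) ([], [])
  pvSeccion "8" g.1 ++ pvSeccion "9" g.2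

-- ===== PRECONDITION & SPEC =====
def Spec_mostrarNoTipicos (lista : List String) (out : String) : Prop := out = mostrarNoTipicos_alt lista
instance (lista : List String) (out : String) : Decidable (Spec_mostrarNoTipicos lista out) := by unfold Spec_mostrarNoTipicos; infer_instance

-- ===== CLAIM (what is proved, stated in full; the proofs are below) =====
def Claim_equal_mostrarNoTipicos : Prop := ∀ (lista : List String), Dom_mostrarNoTipicos lista → Spec_mostrarNoTipicos lista (mostrarNoTipicos lista)

-- ===== LEMMAS AND PROOFS =====
-- a string cannot start with both "8" and "9"
theorem pv_sw89 (c : String) (h : PySem.Str.startswith c "8" = true) :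
    PySem.Str.startswith c "9" = false := by
  simp only [PySem.Str.startswith_eq] at *
  rw [PySem.Chars.startswith_iff] at h
  cases hc : PySem.Chars.startswith c.toList "9".toList
  · rfl
  · rw [PySem.Chars.startswith_iff] at hc
    obtain ⟨t8, h8⟩ := h
    obtain ⟨t9, h9⟩ := hc
    rw [show ("8" : String).toList = ['8'] from rfl] at h8
    rw [show ("9" : String).toList = ['9'] from rfl] at h9
    rw [← h9] at h8
    simp at h8

theorem pv_l8 : ("8" : String).toList = ['8'] := rfl
theorem pv_l9 : ("9" : String).toList = ['9'] := rfl

-- B's grouping pass computes exactly A's two filters, relative order preserved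
theorem pv_bucket (lista : List String) (a b : List String) :
    lista.foldl (fun (g : List String × List String) c =>
      if PySem.Str.startswith c "8" then (g.1 ++ [c], g.2)
      else if PySem.Str.startswith c "9" then (g.1, g.2 ++ [c])
      else g) (a, b)
    = (a ++ lista.filter (fun c => PySem.Str.startswith c "8"),
       b ++ lista.filter (fun c => PySem.Str.startswith c "9")) := by
  induction lista generalizing a b with
  | nil => simp
  | cons c cs ih =>
    simp only [List.foldl_cons, List.filter_cons]
    by_cases h8 : PySem.Str.startswith c "8" = true
    · have h9 := pv_sw89 c h8
      rw [if_pos h8, ih]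
      simp only [PySem.Str.startswith_eq, pv_l8, pv_l9] at h8 h9
      simp [h8, h9]
    · simp only [Bool.not_eq_true] at h8
      by_cases h9 : PySem.Str.startswith c "9" = true
      · rw [if_neg (by simp [PySem.Str.startswith_eq, pv_l8] at h8 ⊢; simp [h8]), if_pos h9, ih]
        simp only [PySem.Str.startswith_eq, pv_l8, pv_l9] at h8 h9
        simp [h8, h9]
      · simp only [Bool.not_eq_true] at h9
        rw [if_neg (by simp [PySem.Str.startswith_eq, pv_l8] at h8 ⊢; simp [h8]),
            if_neg (by simp [PySem.Str.startswith_eq, pv_l9] at h9 ⊢; simp [h9]), ih]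
        simp only [PySem.Str.startswith_eq, pv_l8, pv_l9] at h8 h9
        simp [h8, h9]

theorem pv_inter_nil {α : Type} (xs : List (List α)) : ([] : List α).intercalate xs = xs.flatten := by
  induction xs with
  | nil => simp [List.intercalate]
  | cons x xs ih =>
    cases xs with
    | nil => simp [List.intercalate]
    | cons y ys => simp_all [List.intercalate, List.intersperse]

theorem pv_join_cons (x : String) (l : List String) :
    PySem.Str.join "" (x :: l) = x ++ PySem.Str.join "" l := by
  apply String.toList_inj.mp
  simp [PySem.Str.join, PySem.Chars.join, pv_inter_nil]

theorem pv_join_nil : PySem.Str.join "" [] = "" := by decide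

-- A's inner accumulation of the per-cedula lines equals B's join of them
theorem pv_lines (l : List String) (init : String) :
    l.foldl (fun r c => r ++ ("\n - " ++ c)) init
      = init ++ PySem.Str.join "" (l.map (fun c => "\n - " ++ c)) := by
  induction l generalizing init with
  | nil => simp [pv_join_nil]
  | cons c cs ih =>
    simp only [List.map_cons, List.foldl_cons, pv_join_cons, ih]
    simp [String.append_assoc]

-- one iteration of A's outer loop appends exactly B's section for that code
theorem pv_step (resultado codigo : String) (lista : List String) :
    (let encontrados := lista.filter (fun c => PySem.Str.startswith c codigo)
     if encontrados ≠ [] then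
       let r1 := if encontrados.length = 1 then
           resultado ++ ("\nEl donador " ++ nombreProvincia codigo ++ ", es "
             ++ PySem.Int.toStr (encontrados.length : Int) ++ " con la cédula:")
         else
           resultado ++ ("\nLos donadores " ++ nombreProvincia codigo ++ ", son "
             ++ PySem.Int.toStr (encontrados.length : Int) ++ " con las cédulas:")
       encontrados.foldl (fun r c => r ++ ("\n - " ++ c)) r1
     else
       resultado ++ ("\nLos donadores de la provincia de " ++ nombreProvincia codigo ++ ", son "
         ++ PySem.Int.toStr (encontrados.length : Int)
         ++ " con las cédulas:\nAún no reporta donadores"))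
    = resultado ++ pvSeccion codigo (lista.filter (fun c => PySem.Str.startswith c codigo)) := by
  set e := lista.filter (fun c => PySem.Str.startswith c codigo) with he
  by_cases hne : e = []
  · simp [hne, pvSeccion]
  · simp only [hne, ne_eq, not_false_iff, if_true, pvSeccion, pv_lines]
    by_cases h1 : e.length = 1 <;> simp [h1, String.append_assoc]

-- ===== VERDICT (by name: the statement is the Claim_ definition above) =====
theorem mostrarNoTipicos_spec : Claim_equal_mostrarNoTipicos := by
  intro lista _
  unfold Spec_mostrarNoTipicos mostrarNoTipicos mostrarNoTipicos_alt
  simp only [List.foldl_cons, List.foldl_nil, pv_bucket, List.nil_append, pv_step]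
  simp
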